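-- pv_equiv track=rewrite | github.com/chongzicbo/KG_Tutorial | relation_extract/joint_re_bilstm_ntc/data_helper.py | entity_label_construction
-- ===== SOURCE A (Python) =====
-- def entity_label_construction(entity):
--     '''
--         give each word in an entity the label
--         for entity with multiple words, it should follow the BIES rule
--     '''
--     relation_label = {}
--     for i in range(len(entity)):
--         if i == 0 and len(entity) >= 1:
--             relation_label[entity[i]] = "B"
--         if i != 0 and len(entity) >= 1 and i != len(entity) - 1:
--             relation_label[entity[i]] = "I"
--
--         if i == len(entity) - 1 and len(entity) >= 1:
--             relation_label[entity[i]] = "E"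
--
--         if i == 0 and len(entity) == 1:
--             relation_label[entity[i]] = "S"
--     return relation_label
-- ===== SOURCE B (Python) =====
-- def entity_label_construction(entity):
--     n = len(entity)
--     if n == 0:
--         labels = []
--     elif n == 1:
--         labels = ["S"]
--     else:
--         labels = ["B"] + ["I"] * (n - 2) + ["E"]
--     return dict(zip(entity, labels))
-- ===== Notes on version B (the rewrite author's own statement) =====
-- stated objective: simpler
-- what changed: Replaces the per-index four-way conditional cascade of dict assignments with a closed-form label list keyed on the entity length (empty, singleton S, or B then n-2 times I then E) zipped onto the words, relying on zip's index order so duplicate words overwrite exactly as A does.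
import Mathlib
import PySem

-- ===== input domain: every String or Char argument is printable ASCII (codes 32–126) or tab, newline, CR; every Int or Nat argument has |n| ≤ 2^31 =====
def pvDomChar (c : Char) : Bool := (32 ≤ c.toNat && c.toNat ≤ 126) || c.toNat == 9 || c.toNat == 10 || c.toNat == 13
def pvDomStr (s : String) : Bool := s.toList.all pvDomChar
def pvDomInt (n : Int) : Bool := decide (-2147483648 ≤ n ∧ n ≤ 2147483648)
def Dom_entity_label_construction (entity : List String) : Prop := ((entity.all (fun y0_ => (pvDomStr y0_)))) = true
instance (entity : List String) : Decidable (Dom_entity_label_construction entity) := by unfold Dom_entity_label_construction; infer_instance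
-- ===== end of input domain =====

-- B replaces A's per-index conditional cascade by a closed-form label list zipped onto the words (simpler).

-- ===== PORT A =====
def entity_label_construction (entity : List String) : List (String × String) :=
  ((PySem.List.pyRange 0 (entity.length : Int) 1).foldl (fun relation_label i =>
    let n : Int := entity.length
    let w := PySem.List.pyGetD entity i ""
    let d1 := if i = 0 ∧ 1 ≤ n then relation_label.insert w "B" else relation_label
    let d2 := if i ≠ 0 ∧ 1 ≤ n ∧ i ≠ n - 1 then d1.insert w "I" else d1
    let d3 := if i = n - 1 ∧ 1 ≤ n then d2.insert w "E" else d2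
    let d4 := if i = 0 ∧ n = 1 then d3.insert w "S" else d3
    d4) PySem.Dict.empty).items

-- ===== PORT B =====
def bies_labels (n : Nat) : List String :=
  if n = 0 then []
  else if n = 1 then ["S"]
  else "B" :: (List.replicate (n - 2) "I" ++ ["E"])

def entity_label_construction_alt (entity : List String) : List (String × String) :=
  (PySem.Dict.ofList (entity.zip (bies_labels entity.length))).items

-- ===== PRECONDITION & SPEC =====
def Spec_entity_label_construction (entity : List String) (out : List (String × String)) : Prop := out = entity_label_construction_alt entity
instance (entity : List String) (out : List (String × String)) : Decidable (Spec_entity_label_construction entity out) := by unfold Spec_entity_label_construction; infer_instance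

-- ===== CLAIM (what is proved, stated in full; the proofs are below) =====
def Claim_equal_entity_label_construction : Prop := ∀ (entity : List String), Dom_entity_label_construction entity → Spec_entity_label_construction entity (entity_label_construction entity)

-- ===== LEMMAS AND PROOFS =====

-- the net label A assigns at index i of an n-word entity
def pvLabel (n i : Nat) : String :=
  if n = 1 then "S" else if i = 0 then "B" else if i = n - 1 then "E" else "I"

theorem length_bies_labels (n : Nat) : (bies_labels n).length = n := by
  unfold bies_labels; split_ifs <;> simp <;> omega

theorem getElem_bies_labels (n i : Nat) (h : i < (bies_labels n).length) :
    (bies_labels n)[i] = pvLabel n i := by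
  rw [length_bies_labels] at h
  rcases n with _ | n
  · omega
  rcases n with _ | m
  · interval_cases i; rfl
  have hb : bies_labels (m + 2) = "B" :: (List.replicate m "I" ++ ["E"]) := by
    simp [bies_labels]
  rw [List.getElem_of_eq hb]
  rcases i with _ | j
  · simp [pvLabel]
  · rw [List.getElem_cons_succ]
    by_cases hj : j < m
    · rw [List.getElem_append_left (by simpa using hj)]
      simp [pvLabel]
      omega
    · have hjm : j = m := by omega
      subst hjm
      rw [List.getElem_append_right (by simp)]
      simp [pvLabel]

theorem zip_bies_eq_map (entity : List String) :
    entity.zip (bies_labels entity.length) =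
      (List.range entity.length).map (fun i => (entity.getD i "", pvLabel entity.length i)) := by
  apply List.ext_getElem
  · simp [length_bies_labels]
  · intro i h1 h2
    simp only [List.getElem_zip, List.getElem_map, List.getElem_range]
    have hi : i < entity.length := by simpa [length_bies_labels] using h2
    rw [getElem_bies_labels]
    simp [List.getD_eq_getElem?_getD, hi]

-- A's fold step at an in-range index nets to a single insert of pvLabel
theorem a_step (entity : List String) (d : PySem.Dict String String) (i : Int)
    (h0 : 0 ≤ i) (h1 : i < (entity.length : Int)) :
    (let n : Int := entity.length
     let w := PySem.List.pyGetD entity i ""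
     let d1 := if i = 0 ∧ 1 ≤ n then d.insert w "B" else d
     let d2 := if i ≠ 0 ∧ 1 ≤ n ∧ i ≠ n - 1 then d1.insert w "I" else d1
     let d3 := if i = n - 1 ∧ 1 ≤ n then d2.insert w "E" else d2
     let d4 := if i = 0 ∧ n = 1 then d3.insert w "S" else d3
     d4) = d.insert (entity.getD i.toNat "") (pvLabel entity.length i.toNat) := by
  have hi : i.toNat < entity.length := by omega
  have hget : PySem.List.pyGetD entity i "" = entity.getD i.toNat "" := by
    rw [PySem.List.pyGetD_eq_getElem entity "" h0 h1]
    simp [List.getD_eq_getElem?_getD, hi]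
  simp only [hget]
  rcases eq_or_ne i 0 with hi0 | hi0
  · subst hi0
    rcases eq_or_ne entity.length 1 with hn | hn
    · simp [hn, pvLabel, PySem.Dict.insert_insert_self]
    · have h2 : 2 ≤ entity.length := by omega
      have h3 : ¬ ((0:ℤ) = (entity.length : ℤ) - 1) := by omega
      have h4 : (1:ℤ) ≤ (entity.length : ℤ) := by omega
      have h5 : ((entity.length : ℤ) = 1) = False := by simp; omega
      simp [h3, h4, hn, h5, pvLabel]
  · rcases eq_or_ne i ((entity.length : ℤ) - 1) with hil | hil
    · have hn : entity.length ≠ 1 := by omega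
      have hnz : i.toNat ≠ 0 := by omega
      have hl : i.toNat = entity.length - 1 := by omega
      have h5 : ¬ ((entity.length : ℤ) - 1 = 0) := by omega
      have h6 : entity.length - 1 ≠ 0 := by omega
      have h7 : 1 ≤ entity.length := by omega
      simp [hil, hn, h5, h6, h7, pvLabel]
    · have hn : entity.length ≠ 1 := by omega
      have hnz : i.toNat ≠ 0 := by omega
      have hl : i.toNat ≠ entity.length - 1 := by omega
      have h4 : (1:ℤ) ≤ (entity.length : ℤ) := by omega
      have h5 : ((entity.length : ℤ) = 1) = False := by simp; omega
      simp [hi0, hil, hn, hnz, hl, h4, h5, pvLabel]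

theorem entity_label_eq (entity : List String) :
    entity_label_construction entity = entity_label_construction_alt entity := by
  unfold entity_label_construction entity_label_construction_alt
  rw [zip_bies_eq_map]
  have hfold :
      (PySem.List.pyRange 0 (entity.length : Int) 1).foldl (fun relation_label i =>
        let n : Int := entity.length
        let w := PySem.List.pyGetD entity i ""
        let d1 := if i = 0 ∧ 1 ≤ n then relation_label.insert w "B" else relation_label
        let d2 := if i ≠ 0 ∧ 1 ≤ n ∧ i ≠ n - 1 then d1.insert w "I" else d1
        let d3 := if i = n - 1 ∧ 1 ≤ n then d2.insert w "E" else d2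
        let d4 := if i = 0 ∧ n = 1 then d3.insert w "S" else d3
        d4) PySem.Dict.empty
      = (PySem.List.pyRange 0 (entity.length : Int) 1).foldl
          (fun d i => d.insert (entity.getD i.toNat "") (pvLabel entity.length i.toNat))
          PySem.Dict.empty := by
    apply PySem.List.foldl_congr_mem
    intro d i hi
    rw [PySem.List.mem_pyRange_one] at hi
    exact a_step entity d i hi.1 hi.2
  rw [hfold]
  rw [PySem.List.pyRange_one]
  simp only [Int.sub_zero, Int.toNat_natCast, List.foldl_map]
  show _ = PySem.Dict.items (PySem.Dict.ofList _)
  unfold PySem.Dict.ofList PySem.Dict.update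
  rw [List.foldl_map]
  apply congrArg
  apply PySem.List.foldl_congr_mem
  intro d y _
  simp

-- ===== VERDICT (by name: the statement is the Claim_ definition above) =====
theorem entity_label_construction_spec : Claim_equal_entity_label_construction := by
  intro entity _
  unfold Spec_entity_label_construction
  exact entity_label_eq entity
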